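-- pv_equiv track=rewrite | github.com/cloud99277/KitClaw | rag-engine/md_chunker.py | _build_code_block_lines
-- ===== SOURCE A (Python) =====
-- def _build_code_block_lines(lines: list[str]) -> set[int]:
--     """预扫描，返回所有在代码块内部的行号集合（O(n) 一次扫描）"""
--     in_code = set()
--     inside = False
--     for i, line in enumerate(lines):
--         if line.strip().startswith('```'):
--             inside = not inside
--         elif inside:
--             in_code.add(i)
--     return in_code
-- ===== SOURCE B (Python) =====
-- def _build_code_block_lines(lines: list[str]) -> set[int]:
--     """Collect fence-line indices once, then fill the open..close ranges between
--     consecutive fence pairs (an unclosed final fence closes at len(lines))."""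
--     fences = [i for i, line in enumerate(lines) if line.strip().startswith('```')]
--     result = []
--     it = iter(fences)
--     for opener in it:
--         closer = next(it, len(lines))
--         result.extend(range(opener + 1, closer))
--     return set(result)
-- ===== Notes on version B (the rewrite author's own statement) =====
-- stated objective: alternative
-- what changed: Replaces A's single stateful inside-toggle scan with a two-phase decomposition: collect all fence-line indices first, then fill range(open+1, close) for each consecutive fence pair (an unclosed last fence closes at len(lines)).
import Mathlib
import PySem

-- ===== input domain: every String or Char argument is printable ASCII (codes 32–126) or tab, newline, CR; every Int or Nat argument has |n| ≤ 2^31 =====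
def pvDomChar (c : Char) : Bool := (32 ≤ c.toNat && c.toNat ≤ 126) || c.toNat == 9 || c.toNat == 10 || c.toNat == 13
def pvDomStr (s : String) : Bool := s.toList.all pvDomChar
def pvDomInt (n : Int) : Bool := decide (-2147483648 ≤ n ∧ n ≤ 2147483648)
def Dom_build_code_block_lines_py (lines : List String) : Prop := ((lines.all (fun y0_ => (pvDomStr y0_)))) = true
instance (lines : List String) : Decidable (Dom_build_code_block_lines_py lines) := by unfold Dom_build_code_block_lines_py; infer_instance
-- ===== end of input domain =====

-- B replaces A's stateful toggle with a fence-index scan plus range filling between fence pairs (same O(n) cost, different decomposition).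

-- ===== PORT A =====
def pvStepA (st : PySem.Set Int × Bool) (p : Int × String) : PySem.Set Int × Bool :=
  if PySem.Str.startswith (PySem.Str.strip p.2) "```" then (st.1, !st.2)
  else if st.2 then (PySem.Set.add st.1 p.1, st.2)
  else st

def build_code_block_lines_py (lines : List String) : List Int :=
  ((PySem.List.enumerate lines 0).foldl pvStepA (PySem.Set.empty, false)).1

-- ===== PORT B =====
def pvFences (lines : List String) : List Int :=
  (PySem.List.enumerate lines 0).foldl
    (fun acc p => if PySem.Str.startswith (PySem.Str.strip p.2) "```" then acc ++ [p.1] else acc) []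

-- the pairing loop: opener, then closer = next fence or len(lines); extend with range(opener+1, closer)
def pvFill (fences : List Int) (n : Int) : List Int :=
  match fences with
  | [] => []
  | [o] => PySem.List.pyRange (o + 1) n 1
  | o :: c :: rest => PySem.List.pyRange (o + 1) c 1 ++ pvFill rest n

def build_code_block_lines_py_alt (lines : List String) : List Int :=
  PySem.Set.ofList (pvFill (pvFences lines) (PySem.List.len lines))

-- ===== PRECONDITION & SPEC =====
def Spec_build_code_block_lines_py (lines : List String) (out : List Int) : Prop := out = build_code_block_lines_py_alt lines
instance (lines : List String) (out : List Int) : Decidable (Spec_build_code_block_lines_py lines out) := by unfold Spec_build_code_block_lines_py; infer_instance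

-- ===== CLAIM (what is proved, stated in full; the proofs are below) =====
def Claim_equal_build_code_block_lines_py : Prop := ∀ (lines : List String), Dom_build_code_block_lines_py lines → Spec_build_code_block_lines_py lines (build_code_block_lines_py lines)

-- ===== LEMMAS AND PROOFS =====

def pvIsF (l : String) : Bool := PySem.Str.startswith (PySem.Str.strip l) "```"

/-- the set A collects over a suffix starting at index `i` with toggle `b` -/
def pvBody : List String → Int → Bool → List Int
  | [], _, _ => []
  | l :: ls, i, b =>
    if pvIsF l then pvBody ls (i + 1) (!b)
    else if b then i :: pvBody ls (i + 1) b
    else pvBody ls (i + 1) b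

def pvFIdx : List String → Int → List Int
  | [], _ => []
  | l :: ls, i => if pvIsF l then i :: pvFIdx ls (i + 1) else pvFIdx ls (i + 1)

/-- B's filling, starting inside a block at position `i` -/
def pvFillT (fs : List Int) (n i : Int) : List Int :=
  match fs with
  | [] => PySem.List.pyRange i n 1
  | f :: rest => PySem.List.pyRange i f 1 ++ pvFill rest n

theorem pvFill_cons (f : Int) (fs : List Int) (n : Int) :
    pvFill (f :: fs) n = pvFillT fs n (f + 1) := by cases fs <;> rfl

theorem pvFIdx_lb : ∀ (ls : List String) (i : Int), ∀ f ∈ pvFIdx ls i, i ≤ f := by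
  intro ls
  induction ls with
  | nil => intro i f hf; simp [pvFIdx] at hf
  | cons l ls ih =>
    intro i f hf
    simp only [pvFIdx] at hf
    split at hf
    · rcases List.mem_cons.1 hf with h | h
      · omega
      · have := ih (i + 1) f h; omega
    · have := ih (i + 1) f hf; omega

theorem pvFillT_peel (fs : List Int) (n i : Int) (h1 : ∀ f ∈ fs, i < f) (h2 : i < n) :
    pvFillT fs n i = i :: pvFillT fs n (i + 1) := by
  cases fs with
  | nil => simp only [pvFillT]; exact PySem.List.pyRange_one_cons h2
  | cons f rest =>
    simp only [pvFillT]
    rw [PySem.List.pyRange_one_cons (h1 f (List.mem_cons_self ..))]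
    rfl

theorem pvBody_eq : ∀ (ls : List String) (i n : Int), n = i + ls.length →
    pvBody ls i false = pvFill (pvFIdx ls i) n ∧
    pvBody ls i true = pvFillT (pvFIdx ls i) n i := by
  intro ls
  induction ls with
  | nil =>
    intro i n hn
    constructor
    · rfl
    · simp only [pvBody, pvFIdx, pvFillT]
      exact (PySem.List.pyRange_one_eq_nil (by simp at hn; omega)).symm
  | cons l ls ih =>
    intro i n hn
    have hn' : n = (i + 1) + ls.length := by simp at hn ⊢; omega
    obtain ⟨ihF, ihT⟩ := ih (i + 1) n hn'
    by_cases hf : pvIsF l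
    · constructor
      · simp only [pvBody, pvFIdx, hf, if_pos]
        rw [pvFill_cons]; exact ihT
      · simp only [pvBody, pvFIdx, hf, if_pos, pvFillT]
        rw [PySem.List.pyRange_one_eq_nil (le_refl i), List.nil_append]
        exact ihF
    · rw [Bool.not_eq_true] at hf
      constructor
      · simp only [pvBody, pvFIdx, hf, Bool.false_eq_true, ite_false]
        exact ihF
      · simp only [pvBody, pvFIdx, hf, Bool.false_eq_true, ite_false, ite_true]
        rw [pvFillT_peel (pvFIdx ls (i + 1)) n i
              (fun f hmem => by have := pvFIdx_lb ls (i + 1) f hmem; omega)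
              (by simp at hn; omega)]
        exact congrArg (i :: ·) ihT

theorem pvBody_lb : ∀ (ls : List String) (i : Int) (b : Bool), ∀ x ∈ pvBody ls i b, i ≤ x := by
  intro ls
  induction ls with
  | nil => intro i b x hx; simp [pvBody] at hx
  | cons l ls ih =>
    intro i b x hx
    simp only [pvBody] at hx
    split at hx
    · have := ih (i + 1) (!b) x hx; omega
    · split at hx
      · rcases List.mem_cons.1 hx with h | h
        · omega
        · have := ih (i + 1) _ x h; omega
      · have := ih (i + 1) b x hx; omega

theorem pvBody_pairwise : ∀ (ls : List String) (i : Int) (b : Bool),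
    (pvBody ls i b).Pairwise (· < ·) := by
  intro ls
  induction ls with
  | nil => intro i b; simp [pvBody]
  | cons l ls ih =>
    intro i b
    simp only [pvBody]
    split
    · exact ih (i + 1) (!b)
    · split
      · exact List.Pairwise.cons
          (fun x hx => by have := pvBody_lb ls (i + 1) _ x hx; omega) (ih (i + 1) b)
      · exact ih (i + 1) b

theorem pvFoldA : ∀ (ls : List String) (i : Int) (s : PySem.Set Int) (b : Bool),
    (∀ x ∈ s, x < i) →
    ((PySem.List.enumerate ls i).foldl pvStepA (s, b)).1 = s ++ pvBody ls i b := by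
  intro ls
  induction ls with
  | nil => intro i s b _; simp [PySem.List.enumerate_nil, pvBody]
  | cons l ls ih =>
    intro i s b hs
    rw [PySem.List.enumerate_cons, List.foldl_cons]
    by_cases hf : pvIsF l
    · have : pvStepA (s, b) (i, l) = (s, !b) := by
        simp [pvStepA, pvIsF] at hf ⊢; simp [hf]
      rw [this, ih (i + 1) s (!b) (fun x hx => by have := hs x hx; omega)]
      simp [pvBody, hf]
    · cases b with
      | true =>
        have hnotmem : i ∉ s := fun h => absurd (hs i h) (lt_irrefl i)
        have : pvStepA (s, true) (i, l) = (s ++ [i], true) := by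
          simp [pvStepA, pvIsF] at hf ⊢
          simp [hf, PySem.Set.add, PySem.Set.contains, hnotmem]
        rw [this, ih (i + 1) (s ++ [i]) true
              (fun x hx => by rcases List.mem_append.1 hx with h | h
                              · have := hs x h; omega
                              · simp at h; omega)]
        simp [pvBody, hf, List.append_assoc]
      | false =>
        have : pvStepA (s, false) (i, l) = (s, false) := by
          simp [pvStepA, pvIsF] at hf ⊢; simp [hf]
        rw [this, ih (i + 1) s false (fun x hx => by have := hs x hx; omega)]
        simp [pvBody, hf]

theorem pvFencesAux : ∀ (ls : List String) (i : Int) (acc : List Int),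
    (PySem.List.enumerate ls i).foldl
      (fun acc p => if PySem.Str.startswith (PySem.Str.strip p.2) "```" then acc ++ [p.1] else acc)
      acc = acc ++ pvFIdx ls i := by
  intro ls
  induction ls with
  | nil => intro i acc; simp [PySem.List.enumerate_nil, pvFIdx]
  | cons l ls ih =>
    intro i acc
    rw [PySem.List.enumerate_cons, List.foldl_cons]
    by_cases hf : pvIsF l
    · simp only [pvIsF] at hf
      simp only [hf, if_true]
      rw [ih (i + 1) (acc ++ [i])]
      simp only [pvFIdx, pvIsF, hf, if_true, List.append_assoc, List.singleton_append]
    · simp only [pvIsF, Bool.not_eq_true] at hf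
      simp only [hf, Bool.false_eq_true, ite_false]
      rw [ih (i + 1) acc]
      simp only [pvFIdx, pvIsF, hf, Bool.false_eq_true, ite_false]

theorem pvOfList_nodup : ∀ (xs s : List Int), xs.Nodup → (∀ x ∈ xs, x ∉ s) →
    xs.foldl PySem.Set.add s = s ++ xs := by
  intro xs
  induction xs with
  | nil => intro s _ _; simp
  | cons x xs ih =>
    intro s hnd hdisj
    rw [List.foldl_cons]
    have hx : x ∉ s := hdisj x (List.mem_cons_self ..)
    have hadd : PySem.Set.add s x = s ++ [x] := by
      simp [PySem.Set.add, PySem.Set.contains, hx]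
    rw [hadd, ih (s ++ [x]) (List.nodup_cons.1 hnd).2
          (fun y hy => by
            intro hmem
            rcases List.mem_append.1 hmem with h | h
            · exact hdisj y (List.mem_cons_of_mem _ hy) h
            · simp at h; exact (List.nodup_cons.1 hnd).1 (h ▸ hy))]
    simp [List.append_assoc]

-- ===== VERDICT (by name: the statement is the Claim_ definition above) =====
theorem build_code_block_lines_py_spec : Claim_equal_build_code_block_lines_py := by
  intro lines _
  unfold Spec_build_code_block_lines_py build_code_block_lines_py build_code_block_lines_py_alt
  rw [pvFoldA lines 0 PySem.Set.empty false (by simp [PySem.Set.empty])]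
  have hfences : pvFences lines = pvFIdx lines 0 := by
    unfold pvFences
    rw [pvFencesAux lines 0 []]
    simp
  have hfill : pvFill (pvFIdx lines 0) (PySem.List.len lines) = pvBody lines 0 false := by
    exact ((pvBody_eq lines 0 (PySem.List.len lines) (by simp [PySem.List.len_eq])).1).symm
  rw [hfences, hfill]
  have hnd : (pvBody lines 0 false).Nodup :=
    (pvBody_pairwise lines 0 false).imp (fun h => ne_of_lt h)
  rw [PySem.Set.ofList_eq_foldl, pvOfList_nodup _ [] hnd (by simp)]
  simp [PySem.Set.empty]
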